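-- pv_equiv track=rewrite | github.com/allandiamante/Case_Analise_de_Dados | caseff.py | cp_municipal
-- ===== SOURCE A (Python) =====
-- def cp_municipal(pop_municipios):
--     list_cp = []
--     cp= {5000 : 5, 20000: 10, 100000: 15, 500000 : 20 , 99999999: 25}
--     for pop_municipio in pop_municipios:
--         i=1
--         for valor in cp:
--             if(pop_municipio <= valor):
--                 list_cp.append(i*5)
--                 break;
--             i=i+1
--     return list_cp
-- ===== SOURCE B (Python) =====
-- def cp_municipal(pop_municipios):
--     thresholds = [5000, 20000, 100000, 500000, 99999999]
--     out = []
--     for pop in pop_municipios: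
--         lo, hi = 0, 5
--         while lo < hi:
--             mid = (lo + hi) // 2
--             if thresholds[mid] < pop:
--                 lo = mid + 1
--             else:
--                 hi = mid
--         if lo < 5:
--             out.append((lo + 1) * 5)
--     return out
-- ===== Notes on version B (the rewrite author's own statement) =====
-- stated objective: alternative
-- what changed: Replaces the per-element linear scan over the dict's keys (with a running counter) by a hand-written binary search (bisect_left) over a sorted threshold list, appending (lo+1)*5 when a bracket is found.
import Mathlib
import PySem

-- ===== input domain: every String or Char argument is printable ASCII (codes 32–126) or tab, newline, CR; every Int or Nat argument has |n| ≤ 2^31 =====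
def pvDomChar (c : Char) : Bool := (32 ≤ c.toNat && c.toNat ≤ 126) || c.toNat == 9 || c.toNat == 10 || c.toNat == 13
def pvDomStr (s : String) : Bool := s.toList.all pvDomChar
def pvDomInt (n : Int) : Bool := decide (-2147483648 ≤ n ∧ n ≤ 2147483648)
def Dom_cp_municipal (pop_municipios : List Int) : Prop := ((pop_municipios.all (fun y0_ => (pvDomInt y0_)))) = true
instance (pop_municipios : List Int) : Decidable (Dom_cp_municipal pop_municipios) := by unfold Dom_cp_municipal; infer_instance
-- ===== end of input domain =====

-- ===== PORT A =====
-- B replaces A's per-element linear scan over dict keys by a binary search over a sorted threshold list (alternative decomposition; same results).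

-- A's cp dict, built by insertion as in the Python literal.
def cpDictA : PySem.Dict Int Int :=
  ((((PySem.Dict.empty.insert 5000 5).insert 20000 10).insert 100000 15).insert 500000 20).insert 99999999 25

-- inner 'for valor in cp' loop with counter i and break
def cpInnerA (pop : Int) (i : Int) : List Int → List Int
  | [] => []
  | v :: rest => if pop ≤ v then [i * 5] else cpInnerA pop (i + 1) rest

def cp_municipal (pop_municipios : List Int) : List Int :=
  pop_municipios.foldl (fun list_cp pop => list_cp ++ cpInnerA pop 1 cpDictA.keys) []

-- ===== PORT B =====
-- hand-written bisect_left loop; indices kept as Nat (lo, hi stay in 0..5, so Python's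
-- nonnegative indexing thresholds[mid] is exactly List.getD here, and // on nonnegative
-- ints is Nat division)
def cpThresholds : List Int := [5000, 20000, 100000, 500000, 99999999]

def cpBsearch (pop : Int) (lo hi : Nat) : Nat :=
  if lo < hi then
    let mid := (lo + hi) / 2
    if cpThresholds.getD mid 0 < pop then cpBsearch pop (mid + 1) hi
    else cpBsearch pop lo mid
  else lo
termination_by hi - lo
decreasing_by all_goals omega

def cp_municipal_alt (pop_municipios : List Int) : List Int :=
  pop_municipios.foldl
    (fun out pop =>
      let lo := cpBsearch pop 0 5
      if lo < 5 then out ++ [((lo : Int) + 1) * 5] else out) []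

-- ===== PRECONDITION & SPEC =====
def Spec_cp_municipal (pop_municipios : List Int) (out : List Int) : Prop := out = cp_municipal_alt pop_municipios
instance (pop_municipios : List Int) (out : List Int) : Decidable (Spec_cp_municipal pop_municipios out) := by unfold Spec_cp_municipal; infer_instance

-- ===== CLAIM (what is proved, stated in full; the proofs are below) =====
def Claim_equal_cp_municipal : Prop := ∀ (pop_municipios : List Int), Dom_cp_municipal pop_municipios → Spec_cp_municipal pop_municipios (cp_municipal pop_municipios)

-- ===== LEMMAS AND PROOFS =====

-- one unfolding step of the binary search
theorem cpBsearch_step (pop : Int) (lo hi : Nat) :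
    cpBsearch pop lo hi =
      if lo < hi then
        (if cpThresholds.getD ((lo + hi) / 2) 0 < pop then cpBsearch pop ((lo + hi) / 2 + 1) hi
         else cpBsearch pop lo ((lo + hi) / 2))
      else lo := by
  rw [cpBsearch]

-- closed evaluation of the search tree for the fixed bounds 0..5
theorem cpBsearch_eval (pop : Int) :
    cpBsearch pop 0 5 =
      if 100000 < pop then
        (if 99999999 < pop then 5 else if 500000 < pop then 4 else 3)
      else (if 20000 < pop then 2 else if 5000 < pop then 1 else 0) := by
  have b00 : cpBsearch pop 0 0 = 0 := by rw [cpBsearch_step]; simp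
  have b11 : cpBsearch pop 1 1 = 1 := by rw [cpBsearch_step]; simp
  have b22 : cpBsearch pop 2 2 = 2 := by rw [cpBsearch_step]; simp
  have b33 : cpBsearch pop 3 3 = 3 := by rw [cpBsearch_step]; simp
  have b44 : cpBsearch pop 4 4 = 4 := by rw [cpBsearch_step]; simp
  have b55 : cpBsearch pop 5 5 = 5 := by rw [cpBsearch_step]; simp
  have b01 : cpBsearch pop 0 1 = if 5000 < pop then 1 else 0 := by
    rw [cpBsearch_step]; norm_num [cpThresholds, b11, b00]
  have b02 : cpBsearch pop 0 2 = if 20000 < pop then 2 else cpBsearch pop 0 1 := by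
    rw [cpBsearch_step]; norm_num [cpThresholds, b22]
  have b34 : cpBsearch pop 3 4 = if 500000 < pop then 4 else 3 := by
    rw [cpBsearch_step]; norm_num [cpThresholds, b44, b33]
  have b35 : cpBsearch pop 3 5 = if 99999999 < pop then 5 else cpBsearch pop 3 4 := by
    rw [cpBsearch_step]; norm_num [cpThresholds, b55]
  have b05 : cpBsearch pop 0 5 =
      if 100000 < pop then cpBsearch pop 3 5 else cpBsearch pop 0 2 := by
    rw [cpBsearch_step]; norm_num [cpThresholds]
  rw [b05, b35, b34, b02, b01]

-- per-element agreement: the linear scan chunk equals the bisect chunk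
theorem cp_chunk_eq (pop : Int) :
    cpInnerA pop 1 cpDictA.keys =
      (let lo := cpBsearch pop 0 5
       if lo < 5 then [((lo : Int) + 1) * 5] else []) := by
  have hkeys : cpDictA.keys = [5000, 20000, 100000, 500000, 99999999] := by decide
  rw [hkeys]
  simp only [cpBsearch_eval, cpInnerA]
  split_ifs <;> first | rfl | omega

theorem cp_foldl_eq (pops : List Int) (acc : List Int) :
    pops.foldl (fun list_cp pop => list_cp ++ cpInnerA pop 1 cpDictA.keys) acc =
    pops.foldl (fun out pop =>
      let lo := cpBsearch pop 0 5
      if lo < 5 then out ++ [((lo : Int) + 1) * 5] else out) acc := by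
  induction pops generalizing acc with
  | nil => rfl
  | cons p rest ih =>
      simp only [List.foldl_cons, cp_chunk_eq p]
      by_cases h : cpBsearch p 0 5 < 5 <;> simp [h, ih]

-- ===== VERDICT (by name: the statement is the Claim_ definition above) =====
theorem cp_municipal_spec : Claim_equal_cp_municipal := by
  intro pops _
  unfold Spec_cp_municipal cp_municipal cp_municipal_alt
  exact cp_foldl_eq pops []
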